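-- pv_equiv track=rewrite | github.com/Mawofrecursion/MawofRecursion | public/tools/distill.py | _prioritize_sentences
-- ===== SOURCE A (Python) =====
-- from typing import List, Dict, Any, Optional
--
-- def _prioritize_sentences(flow_detailed: List, max_sentences: int = 8) -> List:
--     """Keep most valuable sentences, then RE-SORT by original position (fix #4)."""
--     priority = {
--         "mechanism": 6, "evidence": 5, "action": 4,
--         "comparison": 3, "implication": 3, "caveat": 2, "claim": 1,
--     }
--     indexed = [(i, priority.get(tag, 0), tag, sent) for i, (tag, sent) in enumerate(flow_detailed)]
--     indexed.sort(key=lambda x: x[1], reverse=True)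
--     kept = indexed[:max_sentences]
--     # re-sort by original position to preserve coherence
--     kept.sort(key=lambda x: x[0])
--     return [(tag, sent) for _, _, tag, sent in kept]
-- ===== SOURCE B (Python) =====
-- def _prioritize_sentences(flow_detailed, max_sentences=8):
--     """Counting selection: find the boundary priority score and keep, in one
--     ordered pass, all higher-scored sentences plus the earliest ties."""
--     priority = {
--         "mechanism": 6, "evidence": 5, "action": 4,
--         "comparison": 3, "implication": 3, "caveat": 2, "claim": 1,
--     }
--     counts = [0] * 7
--     for tag, _ in flow_detailed:
--         counts[priority.get(tag, 0)] += 1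
--     remaining = max_sentences
--     t = 6
--     while t > 0 and counts[t] <= remaining:
--         remaining -= counts[t]
--         t -= 1
--     out = []
--     for tag, sent in flow_detailed:
--         p = priority.get(tag, 0)
--         if p > t:
--             out.append((tag, sent))
--         elif p == t and remaining > 0:
--             out.append((tag, sent))
--             remaining -= 1
--     return out
-- ===== Notes on version B (the rewrite author's own statement) =====
-- stated objective: alternative
-- what changed: Replaces A's two comparison sorts (stable reverse sort by priority, slice, re-sort by index) by counting selection: per-score bucket counts, a descending threshold scan over the 7 possible scores, and a single ordered pass emitting all sentences above the threshold plus the earliest ties, so no sort is performed; Pre_ excludes negative max_sentences, outside the natural domain of a keep-count, where A's slice [:max_sentences] accidentally drops the last |max_sentences| entries.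
-- outside the precondition, e.g. on _prioritize_sentences([('claim', 'a'), ('mechanism', 'b')], -1): A returns [('mechanism', 'b')], B returns []
import Mathlib
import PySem

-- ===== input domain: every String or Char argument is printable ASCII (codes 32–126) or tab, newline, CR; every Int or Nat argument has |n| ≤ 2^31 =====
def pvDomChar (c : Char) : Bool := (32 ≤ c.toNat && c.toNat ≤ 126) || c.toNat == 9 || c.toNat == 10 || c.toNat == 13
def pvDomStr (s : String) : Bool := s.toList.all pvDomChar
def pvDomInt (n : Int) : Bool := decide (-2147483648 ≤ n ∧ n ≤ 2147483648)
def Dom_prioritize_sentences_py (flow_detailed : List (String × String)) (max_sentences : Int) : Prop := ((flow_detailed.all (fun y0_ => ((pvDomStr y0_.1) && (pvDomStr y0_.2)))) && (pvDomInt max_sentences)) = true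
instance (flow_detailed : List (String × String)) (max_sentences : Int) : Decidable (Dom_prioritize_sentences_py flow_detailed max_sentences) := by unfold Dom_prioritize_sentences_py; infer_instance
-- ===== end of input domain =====

-- B replaces A's two comparison sorts by counting selection: bucket counts per priority
-- score, a threshold scan, and one ordered pass emitting the kept sentences (objective: alternative).

-- ===== PORT A =====
-- the literal dict `priority`
def pvPriority : PySem.Dict String Int :=
  ((((((PySem.Dict.empty.insert "mechanism" 6).insert "evidence" 5).insert "action" 4).insert
        "comparison" 3).insert "implication" 3).insert "caveat" 2).insert "claim" 1

def prioritize_sentences_py (flow_detailed : List (String × String)) (max_sentences : Int) :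
    List (String × String) :=
  let indexed := (PySem.List.enumerate flow_detailed 0).map
      (fun p => (p.1, pvPriority.getD p.2.1 0, p.2.1, p.2.2))
  let sorted1 := PySem.List.sorted indexed (fun x => x.2.1) true
  let kept := PySem.List.slice sorted1 none (some max_sentences)
  let kept2 := PySem.List.sorted kept (fun x => x.1) false
  kept2.map (fun x => (x.2.2.1, x.2.2.2))

-- ===== PORT B =====
-- the `while t > 0 and counts[t] <= remaining:` loop of Source B (t only takes values 6..0)
def pvFindT (counts : PySem.Dict Int Int) (remaining : Int) (t : Nat) : Nat × Int :=
  if h : 0 < t ∧ counts.getD (t : Int) 0 ≤ remaining then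
    pvFindT counts (remaining - counts.getD (t : Int) 0) (t - 1)
  else (t, remaining)
termination_by t
decreasing_by omega

def prioritize_sentences_py_alt (flow_detailed : List (String × String)) (max_sentences : Int) :
    List (String × String) :=
  let counts := flow_detailed.foldl
      (fun d p => d.insert (pvPriority.getD p.1 0) (d.getD (pvPriority.getD p.1 0) 0 + 1))
      PySem.Dict.empty
  let tr := pvFindT counts max_sentences 6
  (flow_detailed.foldl
      (fun s p =>
        let pr := pvPriority.getD p.1 0
        if pr > (tr.1 : Int) then (s.1 ++ [p], s.2)
        else if pr = (tr.1 : Int) ∧ s.2 > 0 then (s.1 ++ [p], s.2 - 1)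
        else s)
      ([], tr.2)).1

-- ===== PRECONDITION & SPEC =====
-- Pre_ excludes negative max_sentences, outside the natural domain of a keep-count, where A's
-- slice [:max_sentences] accidentally drops the last |max_sentences| entries.
def Pre_prioritize_sentences_py (flow_detailed : List (String × String)) (max_sentences : Int) : Prop :=
  0 ≤ max_sentences
instance (flow_detailed : List (String × String)) (max_sentences : Int) : Decidable (Pre_prioritize_sentences_py flow_detailed max_sentences) := by unfold Pre_prioritize_sentences_py; infer_instance
def pvWitness_prioritize_sentences_py : (List (String × String)) × Int :=
  ([("mechanism", "m"), ("claim", "c"), ("evidence", "e")], 2)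

def Spec_prioritize_sentences_py (flow_detailed : List (String × String)) (max_sentences : Int) (out : List (String × String)) : Prop := out = prioritize_sentences_py_alt flow_detailed max_sentences
instance (flow_detailed : List (String × String)) (max_sentences : Int) (out : List (String × String)) : Decidable (Spec_prioritize_sentences_py flow_detailed max_sentences out) := by unfold Spec_prioritize_sentences_py; infer_instance

-- ===== CLAIM (what is proved, stated in full; the proofs are below) =====
def Claim_equal_prioritize_sentences_py : Prop := ∀ (flow_detailed : List (String × String)) (max_sentences : Int), Dom_prioritize_sentences_py flow_detailed max_sentences → Pre_prioritize_sentences_py flow_detailed max_sentences → Spec_prioritize_sentences_py flow_detailed max_sentences (prioritize_sentences_py flow_detailed max_sentences)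

-- ===== LEMMAS AND PROOFS =====

-- abbreviations (definitionally equal to the expressions in the ports)
def pvKey (tag : String) : Int := pvPriority.getD tag 0
def pvK (x : Int × Int × String × String) : Int := x.2.1
def pvProj (x : Int × Int × String × String) : String × String := (x.2.2.1, x.2.2.2)
def pvG (p : Int × (String × String)) : Int × Int × String × String :=
  (p.1, pvKey p.2.1, p.2.1, p.2.2)

lemma pvKey_range (tag : String) : 0 ≤ pvKey tag ∧ pvKey tag ≤ 6 := by
  simp only [pvKey, pvPriority, PySem.Dict.getD_insert]
  split_ifs <;> norm_num

-- buckets with scores s, s-1, …, 0 of ys, each in original order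
def pvBuckets {α : Type} (k : α → Int) (ys : List α) : Nat → List α
  | 0 => ys.filter (fun x => decide (k x = (0 : Int)))
  | s + 1 => ys.filter (fun x => decide (k x = ((s + 1 : Nat) : Int))) ++ pvBuckets k ys s

-- buckets with scores t, t-1, …, t'+1
def pvHigh {α : Type} (k : α → Int) (ys : List α) : Nat → Nat → List α
  | 0, _ => []
  | t + 1, t' =>
    if t' < t + 1 then
      ys.filter (fun x => decide (k x = ((t + 1 : Nat) : Int))) ++ pvHigh k ys t t'
    else []

lemma mem_pvBuckets {α : Type} (k : α → Int) (ys : List α) (s : Nat) (y : α)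
    (h : y ∈ pvBuckets k ys s) : y ∈ ys ∧ 0 ≤ k y ∧ k y ≤ (s : Int) := by
  induction s with
  | zero => simp [pvBuckets] at h; exact ⟨h.1, le_of_eq h.2.symm, le_of_eq h.2⟩
  | succ s ih =>
    simp only [pvBuckets, List.mem_append, List.mem_filter, decide_eq_true_eq] at h
    rcases h with ⟨hy, hk⟩ | h
    · exact ⟨hy, by omega, by omega⟩
    · obtain ⟨hy, h0, hs⟩ := ih h
      exact ⟨hy, h0, by omega⟩

lemma pvBuckets_append_of_gt {α : Type} (k : α → Int) (ys : List α) (x : α) (s : Nat)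
    (hx : (s : Int) < k x) : pvBuckets k (ys ++ [x]) s = pvBuckets k ys s := by
  induction s with
  | zero => simp [pvBuckets, List.filter_append]; omega
  | succ s ih =>
    simp only [pvBuckets, List.filter_append, ih (by push_cast at hx ⊢; omega)]
    have h2 : ¬ k x = (s : Int) + 1 := by push_cast at hx ⊢; omega
    simp [h2]

lemma pvInsertBy_append {α : Type} (before : α → α → Bool) (x : α) (l1 l2 : List α)
    (h : ∀ y ∈ l1, before x y = false) :
    PySem.List.insertBy before x (l1 ++ l2) = l1 ++ PySem.List.insertBy before x l2 := by
  induction l1 with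
  | nil => simp
  | cons y t ih =>
    have hy : before x y = false := h y (by simp)
    simp only [List.cons_append, PySem.List.insertBy, hy]
    simp [ih (fun z hz => h z (by simp [hz]))]

lemma pvInsertBy_head {α : Type} (before : α → α → Bool) (x : α) (l : List α)
    (h : ∀ y ∈ l, before x y = true) :
    PySem.List.insertBy before x l = x :: l := by
  cases l with
  | nil => rfl
  | cons y t => simp [PySem.List.insertBy, h y (by simp)]

lemma pvInsertBy_buckets {α : Type} (k : α → Int) (ys : List α) (x : α) (s : Nat)
    (hx0 : 0 ≤ k x) (hxs : k x ≤ (s : Int)) :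
    PySem.List.insertBy (fun a b => decide (k b < k a)) x (pvBuckets k ys s)
      = pvBuckets k (ys ++ [x]) s := by
  induction s with
  | zero =>
    have hkx : k x = 0 := by omega
    rw [PySem.List.insertBy_of_forall_not_before]
    · simp [pvBuckets, List.filter_append, hkx]
    · intro y hy
      obtain ⟨_, h0, hs⟩ := mem_pvBuckets k ys 0 y hy
      simp; omega
  | succ s ih =>
    by_cases hc : k x ≤ (s : Int)
    · simp only [pvBuckets]
      rw [pvInsertBy_append, ih hc]
      · have h2 : ¬ k x = (s : Int) + 1 := by push_cast at hc ⊢; omega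
        simp [List.filter_append, h2]
      · intro y hy
        simp only [List.mem_filter, decide_eq_true_eq] at hy
        simp; omega
    · have hkx : k x = ((s + 1 : Nat) : Int) := by push_cast at hc hxs ⊢; omega
      simp only [pvBuckets]
      rw [pvInsertBy_append (l1 := ys.filter (fun x => decide (k x = ((s + 1 : Nat) : Int))))]
      · rw [pvInsertBy_head]
        · rw [pvBuckets_append_of_gt k ys x s (by omega), List.filter_append]
          simp [hkx]
        · intro y hy
          obtain ⟨_, h0, hs⟩ := mem_pvBuckets k ys s y hy
          simp; omega
      · intro y hy
        simp only [List.mem_filter, decide_eq_true_eq] at hy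
        simp; omega

lemma pvSorted_eq_buckets {α : Type} (k : α → Int) (ys : List α)
    (h : ∀ y ∈ ys, 0 ≤ k y ∧ k y ≤ 6) :
    PySem.List.sorted ys k true = pvBuckets k ys 6 := by
  induction ys using List.reverseRecOn with
  | nil => simp [PySem.List.sorted_rev_eq_foldl_insertBy, pvBuckets]
  | append_singleton ys x ih =>
    have hys : ∀ y ∈ ys, 0 ≤ k y ∧ k y ≤ 6 := fun y hy => h y (by simp [hy])
    have hx := h x (by simp)
    rw [PySem.List.sorted_rev_eq_foldl_insertBy] at ih ⊢
    rw [List.foldl_append, List.foldl_cons, List.foldl_nil, ih hys]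
    exact pvInsertBy_buckets k ys x 6 hx.1 (by exact_mod_cast hx.2)

-- counts[s] equals the length of bucket s
lemma pvCounts_getD (fl : List (String × String)) (v : Int) :
    (fl.foldl
        (fun d p => d.insert (pvPriority.getD p.1 0) (d.getD (pvPriority.getD p.1 0) 0 + 1))
        PySem.Dict.empty).getD v 0
      = ((((PySem.List.enumerate fl 0).map pvG).filter (fun x => decide (pvK x = v))).length : Int) := by
  have h1 : fl.foldl
        (fun d p => d.insert (pvPriority.getD p.1 0) (d.getD (pvPriority.getD p.1 0) 0 + 1))
        PySem.Dict.empty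
      = (fl.map (fun p => pvKey p.1)).foldl
          (fun d x => d.insert x (d.getD x 0 + 1)) (PySem.Dict.empty : PySem.Dict Int Int) := by
    rw [List.foldl_map]; rfl
  rw [h1, PySem.Dict.getD_foldl_insert_add_one, PySem.Dict.getD_empty, zero_add]
  rw [← List.countP_eq_length_filter, List.countP_map, List.count_eq_countP, List.countP_map]
  have h2 : List.countP ((fun x => decide (pvK x = v)) ∘ pvG) (PySem.List.enumerate fl 0)
      = List.countP ((fun p : String × String => decide (pvKey p.1 = v)) ∘ (fun x => x.2))
          (PySem.List.enumerate fl 0) := rfl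
  rw [h2, ← List.countP_map (p := fun p : String × String => decide (pvKey p.1 = v))
        (f := fun x : Int × (String × String) => x.2),
      PySem.List.map_snd_enumerate]
  exact congrArg _ (List.countP_congr (fun p _ => by simp))

-- pvFindT's threshold is at most its input threshold
lemma pvFindT_fst_le (c : PySem.Dict Int Int) (r : Int) (t : Nat) : (pvFindT c r t).1 ≤ t := by
  induction t using Nat.strong_induction_on generalizing r with
  | _ t ih =>
    rw [pvFindT]
    split
    · next h => exact le_trans (ih (t - 1) (by omega) _) (by omega)
    · exact le_refl t

-- taking r elements of the bucket concatenation = full high buckets + prefix of the boundary bucket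
lemma pvTake_buckets {α : Type} (k : α → Int) (ys : List α) (c : PySem.Dict Int Int)
    (hc : ∀ s : Nat, s ≤ 6 →
      c.getD (s : Int) 0 = ((ys.filter (fun x => decide (k x = (s : Int)))).length : Int)) :
    ∀ t : Nat, t ≤ 6 → ∀ r : Int, 0 ≤ r →
      List.take r.toNat (pvBuckets k ys t)
        = pvHigh k ys t (pvFindT c r t).1
            ++ List.take (pvFindT c r t).2.toNat
                (ys.filter (fun x => decide (k x = (((pvFindT c r t).1 : Nat) : Int)))) := by
  intro t
  induction t with
  | zero =>
    intro _ r hr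
    rw [pvFindT]
    simp [pvHigh, pvBuckets]
  | succ t ih =>
    intro ht r hr
    have hcnt := hc (t + 1) ht
    rw [pvFindT]
    by_cases hcond : 0 < t + 1 ∧ c.getD ((t + 1 : Nat) : Int) 0 ≤ r
    · rw [dif_pos hcond]
      simp only [Nat.add_sub_cancel, pvBuckets]
      rw [List.take_append, List.take_of_length_le (by omega)]
      have harith : r.toNat - (ys.filter (fun x => decide (k x = ((t + 1 : Nat) : Int)))).length
          = (r - c.getD ((t + 1 : Nat) : Int) 0).toNat := by omega
      rw [harith, ih (by omega) _ (by omega)]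
      have hle := pvFindT_fst_le c (r - c.getD ((t + 1 : Nat) : Int) 0) t
      rw [show pvHigh k ys (t + 1) (pvFindT c (r - c.getD ((t + 1 : Nat) : Int) 0) t).1
            = ys.filter (fun x => decide (k x = ((t + 1 : Nat) : Int)))
                ++ pvHigh k ys t (pvFindT c (r - c.getD ((t + 1 : Nat) : Int) 0) t).1 from by
        rw [pvHigh, if_pos (by omega)]]
      rw [List.append_assoc]
    · rw [dif_neg hcond]
      have hlt : r < c.getD ((t + 1 : Nat) : Int) 0 := by
        rcases not_and_or.mp hcond with h | h
        · omega
        · omega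
      simp only [pvBuckets]
      rw [List.take_append_of_le_length (by omega)]
      rw [show pvHigh k ys (t + 1) (t + 1) = [] from by rw [pvHigh, if_neg (by omega)]]
      simp

-- the stateful filter of B produces a sublist of its input (after the accumulator)
lemma pvFoldY_sublist (tv : Nat) (zs : List (Int × Int × String × String)) :
    ∀ (r : Int) (acc : List (Int × Int × String × String)),
      ∃ w, (zs.foldl
          (fun s x =>
            if (tv : Int) < pvK x then (s.1 ++ [x], s.2)
            else if pvK x = (tv : Int) ∧ 0 < s.2 then (s.1 ++ [x], s.2 - 1)
            else s) (acc, r)).1 = acc ++ w ∧ w.Sublist zs := by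
  induction zs with
  | nil => intro r acc; exact ⟨[], by simp, List.Sublist.refl _⟩
  | cons z zs ih =>
    intro r acc
    simp only [List.foldl_cons]
    by_cases h1 : (tv : Int) < pvK z
    · rw [if_pos h1]
      obtain ⟨w, hw, hs⟩ := ih r (acc ++ [z])
      exact ⟨z :: w, by simpa [List.append_assoc] using hw, List.Sublist.cons₂ z hs⟩
    · rw [if_neg h1]
      by_cases h2 : pvK z = (tv : Int) ∧ 0 < r
      · rw [if_pos h2]
        obtain ⟨w, hw, hs⟩ := ih (r - 1) (acc ++ [z])
        exact ⟨z :: w, by simpa [List.append_assoc] using hw, List.Sublist.cons₂ z hs⟩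
      · rw [if_neg h2]
        obtain ⟨w, hw, hs⟩ := ih r acc
        exact ⟨w, hw, hs.cons z⟩

-- the stateful filter is a permutation of: high-score entries ++ first-r boundary entries
lemma pvFoldY_perm (tv : Nat) (zs : List (Int × Int × String × String)) :
    ∀ (r : Int) (acc : List (Int × Int × String × String)),
      ((zs.foldl
          (fun s x =>
            if (tv : Int) < pvK x then (s.1 ++ [x], s.2)
            else if pvK x = (tv : Int) ∧ 0 < s.2 then (s.1 ++ [x], s.2 - 1)
            else s) (acc, r)).1).Perm
        (acc ++ zs.filter (fun x => decide ((tv : Int) < pvK x))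
             ++ List.take r.toNat (zs.filter (fun x => decide (pvK x = (tv : Int))))) := by
  induction zs with
  | nil => intro r acc; simp
  | cons z zs ih =>
    intro r acc
    simp only [List.foldl_cons]
    by_cases h1 : (tv : Int) < pvK z
    · rw [if_pos h1]
      refine (ih r (acc ++ [z])).trans (List.Perm.of_eq ?_)
      have hne : ¬ pvK z = (tv : Int) := by omega
      simp [h1, hne, List.append_assoc]
    · rw [if_neg h1]
      by_cases h2 : pvK z = (tv : Int) ∧ 0 < r
      · rw [if_pos h2]
        refine (ih (r - 1) (acc ++ [z])).trans ?_
        have hr1 : r.toNat = (r - 1).toNat + 1 := by omega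
        rw [List.filter_cons_of_neg (by simp [h1]), List.filter_cons_of_pos (by simp [h2.1]),
          hr1, List.take_succ_cons]
        rw [show (acc ++ [z]) ++ zs.filter (fun x => decide ((tv : Int) < pvK x))
              ++ List.take (r - 1).toNat (zs.filter (fun x => decide (pvK x = (tv : Int))))
            = acc ++ (z :: (zs.filter (fun x => decide ((tv : Int) < pvK x))
                ++ List.take (r - 1).toNat (zs.filter (fun x => decide (pvK x = (tv : Int))))))
            from by simp [List.append_assoc]]
        rw [show acc ++ zs.filter (fun x => decide ((tv : Int) < pvK x))
              ++ z :: List.take (r - 1).toNat (zs.filter (fun x => decide (pvK x = (tv : Int))))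
            = acc ++ (zs.filter (fun x => decide ((tv : Int) < pvK x))
                ++ z :: List.take (r - 1).toNat (zs.filter (fun x => decide (pvK x = (tv : Int)))))
            from by simp [List.append_assoc]]
        exact List.Perm.append_left acc List.perm_middle.symm
      · rw [if_neg h2]
        refine (ih r acc).trans (List.Perm.of_eq ?_)
        by_cases h3 : pvK z = (tv : Int)
        · have hr0 : r.toNat = 0 := by
            rcases not_and_or.mp h2 with h | h
            · exact absurd h3 h
            · omega
          rw [List.filter_cons_of_neg (by simp [h1]), List.filter_cons_of_pos (by simp [h3]), hr0]
          simp
        · rw [List.filter_cons_of_neg (by simp [h1]), List.filter_cons_of_neg (by simp [h3])]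

-- the high buckets are a permutation of the high-score filter
lemma pvHigh_perm {α : Type} (k : α → Int) (ys : List α) :
    ∀ (t t' : Nat), (pvHigh k ys t t').Perm
      (ys.filter (fun x => decide ((t' : Int) < k x ∧ k x ≤ (t : Int)))) := by
  intro t
  induction t with
  | zero =>
    intro t'
    have h0 : ys.filter (fun x => decide ((t' : Int) < k x ∧ k x ≤ ((0 : Nat) : Int))) = [] := by
      rw [List.filter_eq_nil_iff]
      intro x _
      simp only [decide_eq_true_eq, not_and, not_le]
      intro h
      omega
    rw [h0, pvHigh]
  | succ t ih =>
    intro t'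
    by_cases h : t' < t + 1
    · rw [pvHigh, if_pos h]
      refine (List.Perm.append_left _ (ih t')).trans ?_
      have e1 : ys.filter (fun x => decide (k x = ((t + 1 : Nat) : Int)))
          = (ys.filter (fun x => decide ((t' : Int) < k x ∧ k x ≤ ((t + 1 : Nat) : Int)))).filter
              (fun x => decide (k x = ((t + 1 : Nat) : Int))) := by
        rw [List.filter_filter]
        refine (List.filter_congr ?_).symm
        intro x _
        rw [Bool.eq_iff_iff]
        simp only [Bool.and_eq_true, decide_eq_true_eq]
        push_cast
        omega
      have e2 : ys.filter (fun x => decide ((t' : Int) < k x ∧ k x ≤ (t : Int)))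
          = (ys.filter (fun x => decide ((t' : Int) < k x ∧ k x ≤ ((t + 1 : Nat) : Int)))).filter
              (fun x => ! decide (k x = ((t + 1 : Nat) : Int))) := by
        rw [List.filter_filter]
        refine (List.filter_congr ?_).symm
        intro x _
        rw [Bool.eq_iff_iff]
        simp only [Bool.and_eq_true, Bool.not_eq_true', decide_eq_true_eq,
          decide_eq_false_iff_not]
        push_cast
        omega
      rw [e1, e2]
      exact List.filter_append_perm _ _
    · rw [pvHigh, if_neg h]
      have h0 : ys.filter (fun x => decide ((t' : Int) < k x ∧ k x ≤ ((t + 1 : Nat) : Int))) = [] := by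
        rw [List.filter_eq_nil_iff]
        intro x _
        simp only [decide_eq_true_eq, not_and, not_le]
        intro hx
        push_cast
        omega
      rw [h0]

-- B's pair-level fold is the projection of the indexed fold
lemma pvFoldB_proj (tv : Nat) (l : List (String × String)) :
    ∀ (i : Int) (r : Int) (acc : List (Int × Int × String × String)),
      l.foldl
          (fun s p =>
            let pr := pvPriority.getD p.1 0
            if pr > (tv : Int) then (s.1 ++ [p], s.2)
            else if pr = (tv : Int) ∧ s.2 > 0 then (s.1 ++ [p], s.2 - 1)
            else s) (acc.map pvProj, r)
        = ((((PySem.List.enumerate l i).map pvG).foldl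
              (fun s x =>
                if (tv : Int) < pvK x then (s.1 ++ [x], s.2)
                else if pvK x = (tv : Int) ∧ 0 < s.2 then (s.1 ++ [x], s.2 - 1)
                else s) (acc, r)).1.map pvProj,
           (((PySem.List.enumerate l i).map pvG).foldl
              (fun s x =>
                if (tv : Int) < pvK x then (s.1 ++ [x], s.2)
                else if pvK x = (tv : Int) ∧ 0 < s.2 then (s.1 ++ [x], s.2 - 1)
                else s) (acc, r)).2) := by
  induction l with
  | nil =>
    intro i r acc
    simp [PySem.List.enumerate_nil]
  | cons p l ih =>
    intro i r acc
    simp only [PySem.List.enumerate_cons, List.map_cons, List.foldl_cons]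
    have hproj : acc.map pvProj ++ [p] = (acc ++ [pvG (i, p)]).map pvProj := by
      simp [pvProj, pvG]
    by_cases h1 : (tv : Int) < pvKey p.1
    · rw [if_pos (show pvPriority.getD p.1 0 > (tv : Int) from h1),
        if_pos (show (tv : Int) < pvK (pvG (i, p)) from h1), hproj]
      exact ih (i + 1) r (acc ++ [pvG (i, p)])
    · rw [if_neg (show ¬ pvPriority.getD p.1 0 > (tv : Int) from h1),
        if_neg (show ¬ (tv : Int) < pvK (pvG (i, p)) from h1)]
      by_cases h2 : pvKey p.1 = (tv : Int) ∧ 0 < r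
      · rw [if_pos (show pvPriority.getD p.1 0 = (tv : Int) ∧ r > 0 from h2),
          if_pos (show pvK (pvG (i, p)) = (tv : Int) ∧ 0 < r from h2), hproj]
        exact ih (i + 1) (r - 1) (acc ++ [pvG (i, p)])
      · rw [if_neg (show ¬ (pvPriority.getD p.1 0 = (tv : Int) ∧ r > 0) from h2),
          if_neg (show ¬ (pvK (pvG (i, p)) = (tv : Int) ∧ 0 < r) from h2)]
        exact ih (i + 1) r acc

-- abbreviations for the terms appearing in the two ports (all definitionally equal to them)
def pvXs (fl : List (String × String)) : List (Int × Int × String × String) :=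
  (PySem.List.enumerate fl 0).map pvG
def pvCounts (fl : List (String × String)) : PySem.Dict Int Int :=
  fl.foldl
    (fun d p => d.insert (pvPriority.getD p.1 0) (d.getD (pvPriority.getD p.1 0) 0 + 1))
    PySem.Dict.empty
def pvTv (fl : List (String × String)) (m : Int) : Nat :=
  (pvFindT (pvCounts fl) m 6).1
def pvRv (fl : List (String × String)) (m : Int) : Int :=
  (pvFindT (pvCounts fl) m 6).2
def pvYv (fl : List (String × String)) (m : Int) : List (Int × Int × String × String) :=
  ((pvXs fl).foldl
    (fun s x =>
      if (pvTv fl m : Int) < pvK x then (s.1 ++ [x], s.2)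
      else if pvK x = (pvTv fl m : Int) ∧ 0 < s.2 then (s.1 ++ [x], s.2 - 1)
      else s) ([], pvRv fl m)).1

-- ===== VERDICT (by name: the statement is the Claim_ definition above) =====
theorem prioritize_sentences_py_spec : Claim_equal_prioritize_sentences_py := by
  intro fl m _ hm
  show prioritize_sentences_py fl m = prioritize_sentences_py_alt fl m
  have hr0 : (0 : Int) ≤ m := hm
  have hkrange : ∀ y ∈ pvXs fl, 0 ≤ pvK y ∧ pvK y ≤ 6 := by
    intro y hy
    unfold pvXs at hy
    obtain ⟨e, _, rfl⟩ := List.mem_map.mp hy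
    exact pvKey_range e.2.1
  have hsorted1 : PySem.List.sorted (pvXs fl) pvK true = pvBuckets pvK (pvXs fl) 6 :=
    pvSorted_eq_buckets pvK (pvXs fl) hkrange
  have hslice : PySem.List.slice (PySem.List.sorted (pvXs fl) pvK true) none (some m)
      = List.take m.toNat (PySem.List.sorted (pvXs fl) pvK true) :=
    PySem.List.slice_to _ hr0
  have hc : ∀ s : Nat, s ≤ 6 →
      (pvCounts fl).getD (s : Int) 0
        = (((pvXs fl).filter (fun x => decide (pvK x = (s : Int)))).length : Int) :=
    fun s _ => pvCounts_getD fl (s : Int)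
  have htake : List.take m.toNat (pvBuckets pvK (pvXs fl) 6)
      = pvHigh pvK (pvXs fl) 6 (pvTv fl m)
          ++ List.take (pvRv fl m).toNat
              ((pvXs fl).filter (fun x => decide (pvK x = (pvTv fl m : Int)))) :=
    pvTake_buckets pvK (pvXs fl) (pvCounts fl) hc 6 le_rfl m hr0
  have hfil : (pvXs fl).filter
        (fun x => decide ((pvTv fl m : Int) < pvK x ∧ pvK x ≤ ((6 : Nat) : Int)))
      = (pvXs fl).filter (fun x => decide ((pvTv fl m : Int) < pvK x)) := by
    refine List.filter_congr ?_
    intro x hx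
    have hr := hkrange x hx
    rw [Bool.eq_iff_iff]
    simp only [decide_eq_true_eq]
    push_cast
    omega
  have hkept : (pvHigh pvK (pvXs fl) 6 (pvTv fl m)
        ++ List.take (pvRv fl m).toNat
            ((pvXs fl).filter (fun x => decide (pvK x = (pvTv fl m : Int))))).Perm
      ((pvXs fl).filter (fun x => decide ((pvTv fl m : Int) < pvK x))
        ++ List.take (pvRv fl m).toNat
            ((pvXs fl).filter (fun x => decide (pvK x = (pvTv fl m : Int))))) :=
    List.Perm.append_right _ ((pvHigh_perm pvK (pvXs fl) 6 (pvTv fl m)).trans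
      (List.Perm.of_eq hfil))
  have hYperm : (pvYv fl m).Perm
      ((pvXs fl).filter (fun x => decide ((pvTv fl m : Int) < pvK x))
        ++ List.take (pvRv fl m).toNat
            ((pvXs fl).filter (fun x => decide (pvK x = (pvTv fl m : Int))))) := by
    have h := pvFoldY_perm (pvTv fl m) (pvXs fl) (pvRv fl m) []
    rw [List.nil_append] at h
    exact h
  have hperm : (pvYv fl m).Perm
      (pvHigh pvK (pvXs fl) 6 (pvTv fl m)
        ++ List.take (pvRv fl m).toNat
            ((pvXs fl).filter (fun x => decide (pvK x = (pvTv fl m : Int))))) :=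
    hYperm.trans hkept.symm
  have hxspw : (pvXs fl).Pairwise (fun a b => a.1 < b.1) := by
    unfold pvXs
    exact List.pairwise_map.mpr (PySem.List.pairwise_lt_enumerate fl 0)
  have hpw : (pvYv fl m).Pairwise (fun a b => a.1 < b.1) := by
    obtain ⟨w, hw, hsub⟩ := pvFoldY_sublist (pvTv fl m) (pvXs fl) (pvRv fl m) []
    rw [List.nil_append] at hw
    rw [show pvYv fl m = w from hw]
    exact hxspw.sublist hsub
  have hsorted2 : PySem.List.sorted
        (pvHigh pvK (pvXs fl) 6 (pvTv fl m)
          ++ List.take (pvRv fl m).toNat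
              ((pvXs fl).filter (fun x => decide (pvK x = (pvTv fl m : Int)))))
        (fun x => x.1) false
      = pvYv fl m :=
    PySem.List.sorted_eq_of_perm_of_pairwise_lt _ _ _ hperm hpw
  have hB : prioritize_sentences_py_alt fl m = (pvYv fl m).map pvProj := by
    have h := pvFoldB_proj (pvTv fl m) fl 0 (pvRv fl m) []
    calc prioritize_sentences_py_alt fl m
        = (fl.foldl
            (fun s p =>
              let pr := pvPriority.getD p.1 0
              if pr > (pvTv fl m : Int) then (s.1 ++ [p], s.2)
              else if pr = (pvTv fl m : Int) ∧ s.2 > 0 then (s.1 ++ [p], s.2 - 1)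
              else s) (([] : List (Int × Int × String × String)).map pvProj, pvRv fl m)).1 := rfl
      _ = (pvYv fl m).map pvProj := by rw [h]; rfl
  calc prioritize_sentences_py fl m
      = (PySem.List.sorted
          (PySem.List.slice (PySem.List.sorted (pvXs fl) pvK true) none (some m))
          (fun x => x.1) false).map pvProj := rfl
    _ = (pvYv fl m).map pvProj := by rw [hslice, hsorted1, htake, hsorted2]
    _ = prioritize_sentences_py_alt fl m := hB.symm
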